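-- pv_equiv track=rewrite | github.com/bambooforest/lcp | abstract-query/abstract_query/prefilter.py | _finalise_prefilters
-- ===== SOURCE A (Python) =====
-- def _finalise_prefilters(prefilters: list[str]) -> str:
--     """
--     todo: not sure if this remove is needed anymore
--     """
--     removable = set()
--     for ix, s in enumerate(prefilters):
--         s = s.strip()
--         if any(i != s and s in i and (" " in i or "\n" in i) for i in prefilters):
--             removable.add(ix)
--     final = set([x for i, x in enumerate(prefilters) if i not in removable])
--
--     return " & ".join(sorted(final))
-- ===== SOURCE B (Python) =====
-- def _finalise_prefilters(prefilters: list[str]) -> str: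
--     """Single-haystack substring index: every whitespace-containing prefilter i
--     contributes i[1:] and i[:-1] (its strict-substring covers) to one
--     NUL-joined haystack; each distinct prefilter is then kept after ONE
--     substring query against that haystack instead of a scan over the list."""
--     parts = []
--     for p in prefilters:
--         if " " in p or "\n" in p:
--             parts.append(p[1:])
--             parts.append(p[:-1])
--     haystack = "\x00".join(parts)
--     out = []
--     for x in sorted(set(prefilters)):
--         if not (parts and x.strip() in haystack):
--             out.append(x)
--     return " & ".join(out)
-- ===== Notes on version B (the rewrite author's own statement) =====
-- stated objective: faster
-- what changed: B builds one NUL-joined haystack out of i[1:] and i[:-1] for every whitespace-containing prefilter (together these cover exactly the strict substrings of i) and decides each distinct prefilter with a single substring query against that haystack, instead of A's per-element scan over all prefilters with per-index removable-set bookkeeping.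
import Mathlib
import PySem

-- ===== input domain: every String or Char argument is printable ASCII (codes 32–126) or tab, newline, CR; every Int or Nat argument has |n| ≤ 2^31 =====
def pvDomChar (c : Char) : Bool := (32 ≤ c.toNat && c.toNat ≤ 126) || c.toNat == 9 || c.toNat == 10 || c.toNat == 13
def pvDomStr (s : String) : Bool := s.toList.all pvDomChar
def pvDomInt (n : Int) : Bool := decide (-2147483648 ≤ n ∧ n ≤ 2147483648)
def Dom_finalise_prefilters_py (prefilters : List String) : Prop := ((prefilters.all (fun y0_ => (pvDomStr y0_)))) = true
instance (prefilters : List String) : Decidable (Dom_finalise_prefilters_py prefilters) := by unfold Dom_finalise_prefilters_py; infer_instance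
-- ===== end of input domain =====

-- B replaces A's all-pairs substring scanning by one NUL-joined haystack built from the whitespace-
-- containing prefilters' strict-substring covers (i[1:] and i[:-1]); each distinct prefilter is then
-- decided by a single substring query against that haystack (measured faster at the larger sizes).

-- ===== PORT A =====
def finalise_prefilters_py (prefilters : List String) : String :=
  let removable : PySem.Set Int :=
    (PySem.List.enumerate prefilters).foldl
      (fun removable p =>
        let s := PySem.Str.strip p.2
        if prefilters.any (fun i =>
            (i != s) && PySem.Str.isIn s i && (PySem.Str.isIn " " i || PySem.Str.isIn "\n" i))
        then removable.add p.1 else removable)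
      PySem.Set.empty
  let final : PySem.Set String :=
    PySem.Set.ofList
      (((PySem.List.enumerate prefilters).filter (fun p => !removable.contains p.1)).map Prod.snd)
  PySem.Str.join " & " (PySem.List.sorted final id)

-- ===== PORT B =====
def finalise_prefilters_py_alt (prefilters : List String) : String :=
  let parts : List String :=
    prefilters.foldl
      (fun parts p =>
        if PySem.Str.isIn " " p || PySem.Str.isIn "\n" p then
          parts ++ [PySem.Str.slice p (some 1) none] ++ [PySem.Str.slice p none (some (-1))]
        else parts) []
  let haystack : String := PySem.Str.join "\x00" parts
  let out : List String :=
    (PySem.List.sorted (PySem.Set.ofList prefilters) id).filter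
      (fun x => !(!parts.isEmpty && PySem.Str.isIn (PySem.Str.strip x) haystack))
  PySem.Str.join " & " out

-- ===== PRECONDITION & SPEC =====
def Spec_finalise_prefilters_py (prefilters : List String) (out : String) : Prop := out = finalise_prefilters_py_alt prefilters
instance (prefilters : List String) (out : String) : Decidable (Spec_finalise_prefilters_py prefilters out) := by unfold Spec_finalise_prefilters_py; infer_instance

-- ===== CLAIM (what is proved, stated in full; the proofs are below) =====
def Claim_equal_finalise_prefilters_py : Prop := ∀ (prefilters : List String), Dom_finalise_prefilters_py prefilters → Spec_finalise_prefilters_py prefilters (finalise_prefilters_py prefilters)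

-- ===== LEMMAS AND PROOFS =====

-- "this element gets removed" (A's condition): some whitespace-containing prefilter strictly contains its strip
def pvQ (xs : List String) (x : String) : Bool :=
  xs.any (fun i =>
    (i != PySem.Str.strip x) && PySem.Str.isIn (PySem.Str.strip x) i &&
      (PySem.Str.isIn " " i || PySem.Str.isIn "\n" i))

-- B's whitespace test and its parts list in flatMap normal form
def pvWs (p : String) : Bool := PySem.Str.isIn " " p || PySem.Str.isIn "\n" p

def pvParts (xs : List String) : List String :=
  xs.flatMap (fun p =>
    if pvWs p then [PySem.Str.slice p (some 1) none, PySem.Str.slice p none (some (-1))] else [])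

lemma pv_parts_foldl (xs : List String) :
    xs.foldl
      (fun parts p =>
        if PySem.Str.isIn " " p || PySem.Str.isIn "\n" p then
          parts ++ [PySem.Str.slice p (some 1) none] ++ [PySem.Str.slice p none (some (-1))]
        else parts) []
    = pvParts xs := by
  have hf : (fun (parts : List String) p =>
        if PySem.Str.isIn " " p || PySem.Str.isIn "\n" p then
          parts ++ [PySem.Str.slice p (some 1) none] ++ [PySem.Str.slice p none (some (-1))]
        else parts)
      = (fun parts p => parts ++
          (if pvWs p then
            [PySem.Str.slice p (some 1) none, PySem.Str.slice p none (some (-1))] else [])) := by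
    funext parts p
    simp only [pvWs]
    split_ifs <;> simp
  rw [hf, PySem.List.foldl_append_eq_flatMap]
  rfl

-- a prefix that avoids c cannot reach past an occurrence of c
lemma pv_prefix_of_prefix_append_cons {c : Char} :
    ∀ {s t u : List Char}, c ∉ s → s <+: t ++ c :: u → s <+: t := by
  intro s
  induction s with
  | nil => intro t u _ _; exact List.nil_prefix
  | cons e s ih =>
    intro t u hc h
    cases t with
    | nil =>
      rcases List.cons_prefix_cons.mp h with ⟨rfl, _⟩
      exact absurd List.mem_cons_self hc
    | cons f t =>
      rcases List.cons_prefix_cons.mp h with ⟨rfl, h2⟩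
      exact List.cons_prefix_cons.mpr ⟨rfl, ih (fun hm => hc (List.mem_cons_of_mem _ hm)) h2⟩

-- an infix that avoids c lives entirely on one side of an occurrence of c
lemma pv_infix_append_cons_iff {s : List Char} {c : Char} (hc : c ∉ s) :
    ∀ {a b : List Char}, (s <:+: a ++ c :: b ↔ s <:+: a ∨ s <:+: b) := by
  intro a
  induction a with
  | nil =>
    intro b
    simp only [List.nil_append]
    constructor
    · intro h
      rcases List.infix_cons_iff.mp h with h1 | h2
      · cases s with
        | nil => exact Or.inl (List.infix_refl _)
        | cons e s =>
          rcases List.cons_prefix_cons.mp h1 with ⟨rfl, _⟩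
          exact absurd List.mem_cons_self hc
      · exact Or.inr h2
    · rintro (h | h)
      · rw [List.infix_nil.mp h]; exact List.nil_infix
      · exact h.trans (List.suffix_cons c b).isInfix
  | cons d a ih =>
    intro b
    constructor
    · intro h
      rcases List.infix_cons_iff.mp h with h1 | h2
      · exact Or.inl (pv_prefix_of_prefix_append_cons hc h1).isInfix
      · rcases (ih (b := b)).mp h2 with h3 | h3
        · exact Or.inl (List.infix_cons h3)
        · exact Or.inr h3
    · rintro (h | h)
      · exact h.trans (List.prefix_append (d :: a) (c :: b)).isInfix
      · exact h.trans (((List.suffix_cons c b).trans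
          (List.suffix_append (d :: a) (c :: b))).isInfix)

-- needle avoiding the separator: substring of the joined haystack = substring of one of the parts
lemma pv_infix_intercalate_iff {s : List Char} {c : Char} (hc : c ∉ s) :
    ∀ {ps : List (List Char)}, ps ≠ [] →
      (s <:+: List.intercalate [c] ps ↔ ∃ p ∈ ps, s <:+: p) := by
  intro ps
  induction ps with
  | nil => intro h; exact absurd rfl h
  | cons p ps ih =>
    intro _
    cases ps with
    | nil => simp [List.intercalate]
    | cons q ps =>
      have hcc : List.intercalate [c] (p :: q :: ps) = p ++ c :: List.intercalate [c] (q :: ps) := by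
        simp [List.intercalate, List.intersperse]
      rw [hcc, pv_infix_append_cons_iff hc, ih (by simp)]
      simp only [List.mem_cons]
      constructor
      · rintro (h | ⟨r, hr, h⟩)
        · exact ⟨p, Or.inl rfl, h⟩
        · exact ⟨r, Or.inr hr, h⟩
      · rintro ⟨r, (rfl | hr), h⟩
        · exact Or.inl h
        · exact Or.inr ⟨r, hr, h⟩

-- s is a strict substring of i ⟺ s is a substring of i[1:] or of i[:-1]
lemma pv_proper_infix_iff {s i : List Char} (hne : i ≠ []) :
    (s <:+: i ∧ s ≠ i) ↔ (s <:+: i.tail ∨ s <:+: i.dropLast) := by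
  constructor
  · rintro ⟨hinf, hns⟩
    obtain ⟨j, hj⟩ := (PySem.Chars.exists_prefix_drop_iff_isIn s i).symm.mp
      ((PySem.Chars.isIn_iff_infix s i).mpr hinf)
    cases j with
    | zero =>
      simp only [List.drop_zero] at hj
      have hlt : s.length < i.length := by
        rcases Nat.lt_or_ge s.length i.length with h | h
        · exact h
        · exact absurd (hj.eq_of_length_le h) hns
      right
      have hs : s = i.take s.length := List.prefix_iff_eq_take.mp hj
      have : s = i.dropLast.take s.length := by
        rw [List.dropLast_eq_take, List.take_take, Nat.min_eq_left (by omega)]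
        exact hs
      exact (List.prefix_iff_eq_take.mpr this).isInfix
    | succ j =>
      left
      refine (PySem.Chars.isIn_iff_infix s i.tail).mp
        ((PySem.Chars.exists_prefix_drop_iff_isIn s i.tail).mp ⟨j, ?_⟩)
      rw [List.drop_tail]
      exact hj
  · have hlen : i.length ≠ 0 := fun h => hne (List.eq_nil_of_length_eq_zero h)
    rintro (h | h)
    · refine ⟨h.trans i.tail_suffix.isInfix, fun hs => ?_⟩
      have := h.length_le
      rw [List.length_tail, hs] at this
      omega
    · refine ⟨h.trans i.dropLast_prefix.isInfix, fun hs => ?_⟩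
      have := h.length_le
      rw [List.length_dropLast, hs] at this
      omega

-- strip returns a sublist of its argument (so it introduces no new characters)
lemma pv_strip_sublist (s : List Char) : List.Sublist (PySem.Chars.strip s) s := by
  have h1 : List.Sublist (PySem.Chars.lstrip s) s := by
    simp only [PySem.Chars.lstrip]
    exact List.dropWhile_sublist _
  have h2 : List.Sublist (PySem.Chars.rstrip (PySem.Chars.lstrip s)) (PySem.Chars.lstrip s) := by
    simp only [PySem.Chars.rstrip]
    have h : List.Sublist (List.dropWhile PySem.Chars.isspace (PySem.Chars.lstrip s).reverse)
        ((PySem.Chars.lstrip s).reverse) := List.dropWhile_sublist _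
    have h' := List.reverse_sublist.mpr h
    rwa [List.reverse_reverse] at h'
  exact h2.trans h1

-- the kept-test of B agrees with the negation of A's removal condition
lemma pv_kept_eq (xs : List String) (hdom : ∀ p ∈ xs, pvDomStr p = true)
    (x : String) (hx : x ∈ xs) :
    (!(!(pvParts xs).isEmpty &&
        PySem.Str.isIn (PySem.Str.strip x) (PySem.Str.join "\x00" (pvParts xs))))
      = !pvQ xs x := by
  suffices h : (!(pvParts xs).isEmpty &&
      PySem.Str.isIn (PySem.Str.strip x) (PySem.Str.join "\x00" (pvParts xs))) = pvQ xs x by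
    rw [h]
  set s := PySem.Str.strip x with hs
  -- the NUL separator occurs in no admitted string, in particular not in s
  have hc : ('\x00' : Char) ∉ s.toList := by
    intro hmem
    have hsub : List.Sublist s.toList x.toList := by
      rw [hs, PySem.Str.toList_strip]
      exact pv_strip_sublist x.toList
    have hxd := hdom x hx
    simp only [pvDomStr, List.all_eq_true] at hxd
    have := hxd _ (hsub.subset hmem)
    simp [pvDomChar] at this
  rw [Bool.eq_iff_iff]
  simp only [Bool.and_eq_true, Bool.not_eq_true', List.isEmpty_eq_false_iff]
  constructor
  · rintro ⟨hne, hin⟩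
    -- search in the haystack → search in one cover → A's condition
    have hinf : s.toList <:+: (PySem.Str.join "\x00" (pvParts xs)).toList :=
      (PySem.Str.isIn_iff_infix _ _).mp hin
    rw [PySem.Str.toList_join] at hinf
    have hjoin : PySem.Chars.join "\x00".toList ((pvParts xs).map String.toList)
        = List.intercalate ['\x00'] ((pvParts xs).map String.toList) := rfl
    rw [hjoin] at hinf
    obtain ⟨q, hq, hinfq⟩ := (pv_infix_intercalate_iff hc (by simpa using hne)).mp hinf
    obtain ⟨r, hr, rfl⟩ := List.mem_map.mp hq
    simp only [pvParts, List.mem_flatMap] at hr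
    obtain ⟨p, hpmem, hrp⟩ := hr
    by_cases hws : pvWs p = true
    · rw [if_pos hws] at hrp
      have hpnil : p.toList ≠ [] := by
        rcases Bool.or_eq_true_iff.mp hws with h | h
        · intro h0
          have := (PySem.Str.isIn_iff_infix _ _).mp h
          rw [h0, List.infix_nil] at this
          simp at this
        · intro h0
          have := (PySem.Str.isIn_iff_infix _ _).mp h
          rw [h0, List.infix_nil] at this
          simp at this
      have hside : s.toList <:+: p.toList.tail ∨ s.toList <:+: p.toList.dropLast := by
        rcases List.mem_pair.mp hrp with rfl | rfl
        · left
          rwa [PySem.Str.toList_slice, PySem.Chars.slice_eq_listSlice,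
            PySem.List.slice_from_one] at hinfq
        · right
          rwa [PySem.Str.slice_to_neg_one] at hinfq
      have hproper := (pv_proper_infix_iff hpnil).mpr hside
      simp only [pvQ, List.any_eq_true]
      refine ⟨p, hpmem, ?_⟩
      simp only [Bool.and_eq_true, bne_iff_ne]
      refine ⟨⟨fun he => hproper.2 (by rw [he]), ?_⟩, hws⟩
      exact (PySem.Str.isIn_iff_infix _ _).mpr hproper.1
    · rw [if_neg hws] at hrp
      simp at hrp
  · intro hq
    simp only [pvQ, List.any_eq_true, Bool.and_eq_true, bne_iff_ne] at hq
    obtain ⟨i, hi, ⟨hne, hin⟩, hws⟩ := hq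
    have hinil : i.toList ≠ [] := by
      rcases Bool.or_eq_true_iff.mp hws with h | h
      · intro h0
        have := (PySem.Str.isIn_iff_infix _ _).mp h
        rw [h0, List.infix_nil] at this
        simp at this
      · intro h0
        have := (PySem.Str.isIn_iff_infix _ _).mp h
        rw [h0, List.infix_nil] at this
        simp at this
    have hinf : s.toList <:+: i.toList := (PySem.Str.isIn_iff_infix _ _).mp hin
    have hnsl : s.toList ≠ i.toList := fun h => hne (String.toList_inj.mp h).symm
    rcases (pv_proper_infix_iff hinil).mp ⟨hinf, hnsl⟩ with hside | hside
    · -- the witness cover is i[1:]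
      have hq : PySem.Str.slice i (some 1) none ∈ pvParts xs := by
        simp only [pvParts, List.mem_flatMap]
        exact ⟨i, hi, by rw [if_pos (show pvWs i = true from hws)]; exact List.mem_cons_self⟩
      refine ⟨List.ne_nil_of_mem hq, ?_⟩
      rw [PySem.Str.isIn_iff_infix, PySem.Str.toList_join]
      have hjoin : PySem.Chars.join "\x00".toList ((pvParts xs).map String.toList)
          = List.intercalate ['\x00'] ((pvParts xs).map String.toList) := rfl
      rw [hjoin, pv_infix_intercalate_iff hc (by simp; exact List.ne_nil_of_mem hq)]
      refine ⟨(PySem.Str.slice i (some 1) none).toList, List.mem_map_of_mem hq, ?_⟩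
      rw [PySem.Str.toList_slice, PySem.Chars.slice_eq_listSlice, PySem.List.slice_from_one]
      exact hside
    · -- the witness cover is i[:-1]
      have hq : PySem.Str.slice i none (some (-1)) ∈ pvParts xs := by
        simp only [pvParts, List.mem_flatMap]
        exact ⟨i, hi, by rw [if_pos (show pvWs i = true from hws)]; simp⟩
      refine ⟨List.ne_nil_of_mem hq, ?_⟩
      rw [PySem.Str.isIn_iff_infix, PySem.Str.toList_join]
      have hjoin : PySem.Chars.join "\x00".toList ((pvParts xs).map String.toList)
          = List.intercalate ['\x00'] ((pvParts xs).map String.toList) := rfl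
      rw [hjoin, pv_infix_intercalate_iff hc (by simp; exact List.ne_nil_of_mem hq)]
      refine ⟨(PySem.Str.slice i none (some (-1))).toList, List.mem_map_of_mem hq, ?_⟩
      rw [PySem.Str.slice_to_neg_one]
      exact hside

-- ==== A-side normalisation (index bookkeeping → value-level filter) ====
lemma pv_fold_mem (q : String → Bool) (l : List (Int × String)) (acc : PySem.Set Int) (ix : Int) :
    ix ∈ l.foldl (fun r p => if q p.2 then r.add p.1 else r) acc ↔
      ix ∈ acc ∨ ∃ p ∈ l, q p.2 = true ∧ ix = p.1 := by
  induction l generalizing acc with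
  | nil => simp
  | cons a l ih =>
    simp only [List.foldl_cons, ih, List.mem_cons]
    by_cases h : q a.2 = true
    · simp [h, PySem.Set.mem_add]
      tauto
    · simp [h]

lemma pv_removable_contains (xs : List String) (p : Int × String)
    (hp : p ∈ PySem.List.enumerate xs 0) :
    (((PySem.List.enumerate xs 0).foldl
        (fun r q => if pvQ xs q.2 then r.add q.1 else r) PySem.Set.empty).contains p.1)
      = pvQ xs p.2 := by
  rw [Bool.eq_iff_iff]
  rw [PySem.Set.contains, List.contains_iff_mem, pv_fold_mem]
  constructor
  · rintro (h | ⟨p', hp', hq, heq⟩)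
    · simp [PySem.Set.empty] at h
    · rw [PySem.List.mem_enumerate_iff] at hp hp'
      obtain ⟨k, hk, rfl⟩ := hp
      obtain ⟨k', hk', rfl⟩ := hp'
      simp at heq
      subst heq
      exact hq
  · intro h
    exact Or.inr ⟨p, hp, h, rfl⟩

lemma pv_final_eq (xs : List String) :
    (((PySem.List.enumerate xs 0).filter
        (fun p => !((PySem.List.enumerate xs 0).foldl
          (fun r q => if pvQ xs q.2 then r.add q.1 else r) PySem.Set.empty).contains p.1)).map Prod.snd)
      = xs.filter (fun x => !pvQ xs x) := by
  rw [List.filter_congr (fun p hp => by rw [pv_removable_contains xs p hp])]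
  have h : (fun p : Int × String => !pvQ xs p.2) = (fun x => !pvQ xs x) ∘ Prod.snd := rfl
  rw [h, ← List.filter_map, PySem.List.map_snd_enumerate]

lemma pv_sorted_filter (xs : List String) :
    PySem.List.sorted (PySem.Set.ofList (xs.filter (fun x => !pvQ xs x))) id =
      (PySem.List.sorted (PySem.Set.ofList xs) id).filter (fun x => !pvQ xs x) := by
  have hnd : (PySem.List.sorted (PySem.Set.ofList xs) id).Nodup :=
    ((PySem.List.sorted_perm (PySem.Set.ofList xs) id false).nodup_iff).mpr
      (PySem.Set.nodup_ofList xs)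
  apply PySem.List.sorted_eq_of_perm_of_pairwise_lt
  · rw [List.perm_ext_iff_of_nodup (hnd.filter _) (PySem.Set.nodup_ofList _)]
    intro a
    simp [PySem.List.mem_sorted, PySem.Set.mem_ofList, List.mem_filter]
  · have hpw := PySem.List.sorted_pairwise (PySem.Set.ofList xs) (id : String → String)
    exact ((hpw.and hnd).imp (fun h => lt_of_le_of_ne h.1 h.2)).filter _

-- ===== VERDICT (by name: the statement is the Claim_ definition above) =====
theorem finalise_prefilters_py_spec : Claim_equal_finalise_prefilters_py := by
  intro xs hdom
  have hdom' : ∀ p ∈ xs, pvDomStr p = true := by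
    simpa [Dom_finalise_prefilters_py, List.all_eq_true] using hdom
  show PySem.Str.join " & "
      (PySem.List.sorted (PySem.Set.ofList
        (((PySem.List.enumerate xs 0).filter
          (fun p => !((PySem.List.enumerate xs 0).foldl
            (fun r q => if pvQ xs q.2 then r.add q.1 else r) PySem.Set.empty).contains p.1)).map
          Prod.snd)) id)
    = PySem.Str.join " & "
      ((PySem.List.sorted (PySem.Set.ofList xs) id).filter
        (fun x => !(!(xs.foldl
            (fun parts p =>
              if PySem.Str.isIn " " p || PySem.Str.isIn "\n" p then
                parts ++ [PySem.Str.slice p (some 1) none] ++ [PySem.Str.slice p none (some (-1))]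
              else parts) []).isEmpty &&
          PySem.Str.isIn (PySem.Str.strip x)
            (PySem.Str.join "\x00" (xs.foldl
              (fun parts p =>
                if PySem.Str.isIn " " p || PySem.Str.isIn "\n" p then
                  parts ++ [PySem.Str.slice p (some 1) none] ++ [PySem.Str.slice p none (some (-1))]
                else parts) [])))))
  rw [pv_parts_foldl]
  rw [List.filter_congr (fun x hxm => pv_kept_eq xs hdom' x
    (by
      have := hxm
      rwa [PySem.List.mem_sorted, PySem.Set.mem_ofList] at this))]
  rw [pv_final_eq, pv_sorted_filter]
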